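-- pv_equiv track=rewrite | github.com/brunoskonrad/advent-of-code-2024 | advent_of_code_2024/day1/part2.py | count_occurrances
-- ===== SOURCE A (Python) =====
-- def count_occurrances(array: list[int]) -> dict[int, int]:
--   occurrances = {}
--
--   for i in array:
--     k = str(i)
--     if k not in occurrances:
--       occurrances[k] = 0
--     occurrances[k] += 1
--
--   return occurrances
-- ===== SOURCE B (Python) =====
-- def count_occurrances(array: list[int]) -> dict[int, int]:
--   return {str(k): array.count(k) for k in dict.fromkeys(array)}
-- ===== Notes on version B (the rewrite author's own statement) =====
-- stated objective: simpler
-- what changed: Replaces the single accumulating dict pass with a one-line comprehension: first-occurrence dedup via dict.fromkeys, then a separate array.count scan per distinct value.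
import Mathlib
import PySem

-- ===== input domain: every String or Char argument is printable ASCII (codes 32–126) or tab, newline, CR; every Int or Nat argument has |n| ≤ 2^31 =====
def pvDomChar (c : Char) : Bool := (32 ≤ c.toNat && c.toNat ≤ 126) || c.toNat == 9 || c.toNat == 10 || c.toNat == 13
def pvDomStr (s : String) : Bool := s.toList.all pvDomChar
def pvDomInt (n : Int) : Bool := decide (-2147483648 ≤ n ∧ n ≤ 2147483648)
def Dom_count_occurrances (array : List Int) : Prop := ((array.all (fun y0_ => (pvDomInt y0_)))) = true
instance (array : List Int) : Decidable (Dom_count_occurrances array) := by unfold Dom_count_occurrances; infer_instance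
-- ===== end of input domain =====

-- B replaces A's single accumulating dict pass with "dedup first, then one count-scan per distinct value" (simpler one-liner; no speed claim).


-- ===== PORT A =====
-- A: one accumulating pass; `if k not in occurrances: occurrances[k] = 0` then `occurrances[k] += 1`
def count_occurrances (array : List Int) : List (String × Int) :=
  (array.foldl
    (fun occurrances i =>
      let k := PySem.Int.toStr i
      let d1 := if occurrances.contains k then occurrances else occurrances.insert k 0
      d1.insert k (d1.getD k 0 + 1))
    PySem.Dict.empty).items

-- ===== PORT B =====
-- B: {str(k): array.count(k) for k in dict.fromkeys(array)}
def count_occurrances_alt (array : List Int) : List (String × Int) :=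
  (PySem.List.dedup array).map (fun k => (PySem.Int.toStr k, (PySem.List.count array k : Int)))

-- ===== PRECONDITION & SPEC =====
def Spec_count_occurrances (array : List Int) (out : List (String × Int)) : Prop := out = count_occurrances_alt array
instance (array : List Int) (out : List (String × Int)) : Decidable (Spec_count_occurrances array out) := by unfold Spec_count_occurrances; infer_instance

-- ===== CLAIM (what is proved, stated in full; the proofs are below) =====
def Claim_equal_count_occurrances : Prop := ∀ (array : List Int), Dom_count_occurrances array → Spec_count_occurrances array (count_occurrances array)

-- ===== LEMMAS AND PROOFS =====

-- digit characters below 10 are pairwise distinct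
theorem pv_digitChar_inj {a b : Nat} (ha : a < 10) (hb : b < 10)
    (h : Nat.digitChar a = Nat.digitChar b) : a = b := by
  interval_cases a <;> interval_cases b <;> simp_all [Nat.digitChar]

-- base-10 digit strings of distinct naturals are distinct
theorem pv_toDigits10_inj (n : Nat) : ∀ m : Nat, Nat.toDigits 10 n = Nat.toDigits 10 m → n = m := by
  induction n using Nat.strong_induction_on with
  | _ n ih =>
    intro m h
    rw [Nat.toDigits_eq_if (n := n) (by norm_num), Nat.toDigits_eq_if (n := m) (by norm_num)] at h
    by_cases h1 : n < 10 <;> by_cases h2 : m < 10 <;> simp only [h1, h2, if_true, if_false] at h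
    · exact pv_digitChar_inj h1 h2 (by simpa using h)
    · exfalso
      have hl := congrArg List.length h
      have := @Nat.length_toDigits_pos 10 (m / 10)
      simp only [List.length_cons, List.length_append, List.length_nil] at hl
      omega
    · exfalso
      have hl := congrArg List.length h
      have := @Nat.length_toDigits_pos 10 (n / 10)
      simp only [List.length_cons, List.length_append, List.length_nil] at hl
      omega
    · obtain ⟨hpre, hsuf⟩ := List.append_inj' h (by simp)
      have hdiv : n / 10 = m / 10 :=
        ih (n / 10) (Nat.div_lt_self (by omega) (by norm_num)) _ hpre
      have hmod : n % 10 = m % 10 :=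
        pv_digitChar_inj (Nat.mod_lt _ (by norm_num)) (Nat.mod_lt _ (by norm_num))
          (by simpa using hsuf)
      omega

theorem pv_toChars_inj : Function.Injective PySem.Int.toChars := by
  intro a b h
  unfold PySem.Int.toChars at h
  split_ifs at h with ha hb hb
  · have := pv_toDigits10_inj a.natAbs b.natAbs (by simpa using h)
    omega
  · exfalso
    have hm : '-' ∈ Nat.toDigits 10 b.toNat := by
      rw [← h]; exact List.mem_cons_self
    have := Nat.isDigit_of_mem_toDigits (by norm_num) (by norm_num) hm
    simp [Char.isDigit] at this
  · exfalso
    have hm : '-' ∈ Nat.toDigits 10 a.toNat := by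
      rw [h]; exact List.mem_cons_self
    have := Nat.isDigit_of_mem_toDigits (by norm_num) (by norm_num) hm
    simp [Char.isDigit] at this
  · have := pv_toDigits10_inj a.toNat b.toNat h
    omega

-- str(i) is injective on Int — the reason A's string-keyed dict never merges two distinct ints
theorem pv_toStr_inj : Function.Injective PySem.Int.toStr := by
  intro a b h
  apply pv_toChars_inj
  rw [← PySem.Int.toList_toStr, ← PySem.Int.toList_toStr, h]

-- A's loop body ("insert 0 if absent, then += 1") is the standard counting insert
theorem pv_stepA (d : PySem.Dict String Int) (i : Int) :
    (let k := PySem.Int.toStr i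
     let d1 := if d.contains k then d else d.insert k 0
     d1.insert k (d1.getD k 0 + 1))
    = d.insert (PySem.Int.toStr i) (d.getD (PySem.Int.toStr i) 0 + 1) := by
  set k := PySem.Int.toStr i
  by_cases hc : d.contains k
  · simp [hc]
  · simp only [hc, if_false, Bool.false_eq_true]
    rw [PySem.Dict.getD_insert_self, PySem.Dict.insert_insert_self,
        PySem.Dict.getD_of_not_contains d 0 (by simpa using hc)]

-- ordered first-occurrence dedup commutes with an injective map
theorem pv_foldl_add_map {α β : Type} [BEq α] [LawfulBEq α] [BEq β] [LawfulBEq β]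
    (f : α → β) (hf : Function.Injective f) (l : List α) :
    ∀ s : List α, (l.map f).foldl PySem.Set.add (s.map f) = (l.foldl PySem.Set.add s).map f := by
  induction l with
  | nil => intro s; simp
  | cons x xs ih =>
    intro s
    have hadd : PySem.Set.add (s.map f) (f x) = (PySem.Set.add s x).map f := by
      unfold PySem.Set.add PySem.Set.contains
      have hce : (s.map f).contains (f x) = s.contains x := by
        simp [hf.eq_iff]
      rw [hce]
      split_ifs <;> simp
    simp only [List.map_cons, List.foldl_cons, hadd]
    exact ih _

theorem pv_ofList_map {α β : Type} [BEq α] [LawfulBEq α] [BEq β] [LawfulBEq β]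
    (f : α → β) (hf : Function.Injective f) (l : List α) :
    PySem.Set.ofList (l.map f) = (PySem.Set.ofList l).map f := by
  unfold PySem.Set.ofList
  have := pv_foldl_add_map f hf l []
  simpa [PySem.Set.empty] using this

-- ===== VERDICT (by name: the statement is the Claim_ definition above) =====
theorem count_occurrances_spec : Claim_equal_count_occurrances := by
  intro array _
  unfold Spec_count_occurrances count_occurrances count_occurrances_alt
  have hfun : (fun (occurrances : PySem.Dict String Int) (i : Int) =>
      let k := PySem.Int.toStr i
      let d1 := if occurrances.contains k then occurrances else occurrances.insert k 0
      d1.insert k (d1.getD k 0 + 1))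
      = (fun (d : PySem.Dict String Int) (i : Int) =>
          d.insert (PySem.Int.toStr i) (d.getD (PySem.Int.toStr i) 0 + 1)) :=
    funext fun d => funext fun i => pv_stepA d i
  have hmap : List.foldl (fun (d : PySem.Dict String Int) (i : Int) =>
        d.insert (PySem.Int.toStr i) (d.getD (PySem.Int.toStr i) 0 + 1)) PySem.Dict.empty array
      = List.foldl (fun d k => d.insert k (d.getD k 0 + 1)) PySem.Dict.empty
          (array.map PySem.Int.toStr) :=
    (List.foldl_map (f := PySem.Int.toStr)
      (g := fun (d : PySem.Dict String Int) (k : String) => d.insert k (d.getD k 0 + 1))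
      (l := array) (init := PySem.Dict.empty)).symm
  rw [hfun, hmap,
      PySem.Dict.foldl_insert_getD_add_one_eq_counter, PySem.Dict.items_counter,
      pv_ofList_map _ pv_toStr_inj, List.map_map]
  apply List.map_congr_left
  intro k _
  simp [PySem.List.count, List.count_map_of_injective _ _ pv_toStr_inj]
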